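-- pv_equiv track=rewrite | github.com/christianrosdahl/aoc2024 | day21.py | is_forbidden_sequence
-- ===== SOURCE A (Python) =====
-- def is_forbidden_sequence(sequence, start_pos, forbidden_pos):
--     pos = start_pos
--     command_to_change = {"^": (-1, 0), "v": (1, 0), "<": (0, -1), ">": (0, 1)}
--     for command in sequence:
--         change = command_to_change[command]
--         pos = (pos[0] + change[0], pos[1] + change[1])
--         if pos == forbidden_pos:
--             return True
--     return False
-- ===== SOURCE B (Python) =====
-- def _hit_times(sequence, plus, minus, need):
--     """Times (1-based command counts) at which the 1-D displacement along one
--     axis (+1 for `plus`, -1 for `minus`, 0 otherwise) equals `need`."""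
--     hits = set()
--     d = 0
--     for k, ch in enumerate(sequence, 1):
--         d += (ch == plus) - (ch == minus)
--         if d == need:
--             hits.add(k)
--     return hits
--
--
-- def is_forbidden_sequence(sequence, start_pos, forbidden_pos):
--     # Axis decomposition: the walk hits forbidden_pos iff at some common time
--     # the row displacement and the column displacement both equal their targets.
--     row_hits = _hit_times(sequence, "v", "^", forbidden_pos[0] - start_pos[0])
--     col_hits = _hit_times(sequence, ">", "<", forbidden_pos[1] - start_pos[1])
--     return not row_hits.isdisjoint(col_hits)
-- ===== Notes on version B (the rewrite author's own statement) =====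
-- stated objective: alternative
-- what changed: B decomposes the 2-D walk into two independent 1-D displacement scans (rows and columns), collects for each axis the set of times at which that axis matches its target offset, and answers by testing whether the two hit-time sets intersect; A interleaves a position-tuple simulation with an equality check and early return.
import Mathlib
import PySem

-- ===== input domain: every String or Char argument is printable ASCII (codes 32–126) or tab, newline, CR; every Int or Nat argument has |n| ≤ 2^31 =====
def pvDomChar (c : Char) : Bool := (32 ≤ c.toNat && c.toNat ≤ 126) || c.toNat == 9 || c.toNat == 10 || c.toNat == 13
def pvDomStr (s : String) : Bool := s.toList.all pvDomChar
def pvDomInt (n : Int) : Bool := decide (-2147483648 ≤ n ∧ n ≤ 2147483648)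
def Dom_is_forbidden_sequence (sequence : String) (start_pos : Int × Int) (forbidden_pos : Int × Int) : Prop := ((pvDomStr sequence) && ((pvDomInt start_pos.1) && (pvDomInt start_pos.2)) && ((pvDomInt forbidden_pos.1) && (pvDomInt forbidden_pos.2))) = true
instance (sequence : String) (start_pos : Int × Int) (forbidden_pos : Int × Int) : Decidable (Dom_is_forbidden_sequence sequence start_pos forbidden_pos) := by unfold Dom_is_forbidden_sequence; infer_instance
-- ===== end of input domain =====

-- B decomposes the 2-D walk into two independent 1-D displacement scans (one per axis),
-- collects the hit-time sets and intersects them, instead of A's interleaved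
-- position-tuple simulation with early return (objective: alternative algorithm).


-- ===== PORT A =====
-- A's dict lookup; outside "^v<>" Python raises KeyError (excluded by Pre_), here (0,0).
def pvChangeA (c : Char) : Int × Int :=
  if c = '^' then (-1, 0) else if c = 'v' then (1, 0)
  else if c = '<' then (0, -1) else if c = '>' then (0, 1) else (0, 0)

def pvGoA (cs : List Char) (pos forbidden : Int × Int) : Bool :=
  match cs with
  | [] => false
  | c :: rest =>
    let change := pvChangeA c
    let pos' := (pos.1 + change.1, pos.2 + change.2)
    if pos' = forbidden then true else pvGoA rest pos' forbidden

def is_forbidden_sequence (sequence : String) (start_pos : Int × Int) (forbidden_pos : Int × Int) : Bool :=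
  pvGoA sequence.toList start_pos forbidden_pos

-- ===== PORT B =====
-- Source B's _hit_times loop: 1-based times at which the 1-D displacement equals `need`.
def pvHitTimesGo (cs : List Char) (plus minus : Char) (need : Int)
    (k d : Int) (hits : PySem.Set Int) : PySem.Set Int :=
  match cs with
  | [] => hits
  | c :: rest =>
    let d' := d + ((if c = plus then (1 : Int) else 0) - (if c = minus then (1 : Int) else 0))
    let hits' := if d' = need then PySem.Set.add hits (k + 1) else hits
    pvHitTimesGo rest plus minus need (k + 1) d' hits'

def pvHitTimes (cs : List Char) (plus minus : Char) (need : Int) : PySem.Set Int :=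
  pvHitTimesGo cs plus minus need 0 0 PySem.Set.empty

def is_forbidden_sequence_alt (sequence : String) (start_pos : Int × Int) (forbidden_pos : Int × Int) : Bool :=
  let row_hits := pvHitTimes sequence.toList 'v' '^' (forbidden_pos.1 - start_pos.1)
  let col_hits := pvHitTimes sequence.toList '>' '<' (forbidden_pos.2 - start_pos.2)
  !(PySem.Set.isdisjoint row_hits col_hits)

-- ===== PRECONDITION & SPEC =====
-- Pre_ excludes exactly the sequences containing a command outside "^v<>", on which Python A raises KeyError.
def Pre_is_forbidden_sequence (sequence : String) (start_pos : Int × Int) (forbidden_pos : Int × Int) : Prop :=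
  sequence.toList.all (fun c => c == '^' || c == 'v' || c == '<' || c == '>') = true
instance (sequence : String) (start_pos : Int × Int) (forbidden_pos : Int × Int) : Decidable (Pre_is_forbidden_sequence sequence start_pos forbidden_pos) := by unfold Pre_is_forbidden_sequence; infer_instance

def pvWitness_is_forbidden_sequence : String × (Int × Int) × (Int × Int) := ("^^>v", (3, 2), (1, 2))

def Spec_is_forbidden_sequence (sequence : String) (start_pos : Int × Int) (forbidden_pos : Int × Int) (out : Bool) : Prop := out = is_forbidden_sequence_alt sequence start_pos forbidden_pos
instance (sequence : String) (start_pos : Int × Int) (forbidden_pos : Int × Int) (out : Bool) : Decidable (Spec_is_forbidden_sequence sequence start_pos forbidden_pos out) := by unfold Spec_is_forbidden_sequence; infer_instance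

-- ===== CLAIM (what is proved, stated in full; the proofs are below) =====
def Claim_equal_is_forbidden_sequence : Prop := ∀ (sequence : String) (start_pos : Int × Int) (forbidden_pos : Int × Int), Dom_is_forbidden_sequence sequence start_pos forbidden_pos → Pre_is_forbidden_sequence sequence start_pos forbidden_pos → Spec_is_forbidden_sequence sequence start_pos forbidden_pos (is_forbidden_sequence sequence start_pos forbidden_pos)

-- ===== LEMMAS AND PROOFS =====

-- proof-only: per-character 1-D displacement along an axis
def pvD (plus minus : Char) (c : Char) : Int :=
  (if c = plus then 1 else 0) - (if c = minus then 1 else 0)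

-- proof-only: displacement of a whole prefix
def pvDSum (plus minus : Char) (cs : List Char) : Int := (cs.map (pvD plus minus)).sum

theorem pvChangeA_eq (c : Char) : pvChangeA c = (pvD 'v' '^' c, pvD '>' '<' c) := by
  unfold pvChangeA pvD
  split_ifs with h1 h2 h3 h4 <;> simp_all

theorem pvDSum_take_succ (plus minus : Char) (c : Char) (cs : List Char) (j : Nat) :
    pvDSum plus minus ((c :: cs).take (j + 1)) =
      pvD plus minus c + pvDSum plus minus (cs.take j) := by
  simp [pvDSum, List.take_succ_cons]

theorem pvDSum_take_one (plus minus : Char) (c : Char) (cs : List Char) :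
    pvDSum plus minus ((c :: cs).take 1) = pvD plus minus c := by
  simp [pvDSum]

-- A hits forbidden iff some nonempty prefix's displacement matches on both axes
theorem pvGoA_iff (cs : List Char) (pos forbidden : Int × Int) :
    pvGoA cs pos forbidden = true ↔
      ∃ j : Nat, j < cs.length ∧
        pos.1 + pvDSum 'v' '^' (cs.take (j + 1)) = forbidden.1 ∧
        pos.2 + pvDSum '>' '<' (cs.take (j + 1)) = forbidden.2 := by
  induction cs generalizing pos with
  | nil => simp [pvGoA]
  | cons c rest ih =>
    simp only [pvGoA, pvChangeA_eq]
    by_cases h : ((pos.1 + pvD 'v' '^' c, pos.2 + pvD '>' '<' c) : Int × Int) = forbidden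
    · rw [if_pos h]
      refine iff_of_true rfl ⟨0, by simp, ?_, ?_⟩
      · rw [pvDSum_take_one]; exact congrArg Prod.fst h
      · rw [pvDSum_take_one]; exact congrArg Prod.snd h
    · rw [if_neg h, ih]
      constructor
      · rintro ⟨j, hj, hr, hc⟩
        refine ⟨j + 1, by simpa using Nat.succ_lt_succ hj, ?_, ?_⟩
        · rw [pvDSum_take_succ]; omega
        · rw [pvDSum_take_succ]; omega
      · rintro ⟨j, hj, hr, hc⟩
        match j with
        | 0 =>
          exfalso
          apply h
          rw [pvDSum_take_one] at hr
          rw [pvDSum_take_one] at hc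
          exact Prod.ext_iff.mpr ⟨hr, hc⟩
        | j' + 1 =>
          refine ⟨j', by simpa using Nat.lt_of_succ_lt_succ hj, ?_, ?_⟩
          · rw [pvDSum_take_succ] at hr; omega
          · rw [pvDSum_take_succ] at hc; omega

-- membership characterisation of Source B's hit-time accumulator loop
theorem mem_pvHitTimesGo (cs : List Char) (plus minus : Char) (need : Int)
    (k d : Int) (hits : PySem.Set Int) (m : Int) :
    m ∈ pvHitTimesGo cs plus minus need k d hits ↔
      m ∈ hits ∨ ∃ j : Nat, j < cs.length ∧ m = k + j + 1 ∧
        d + pvDSum plus minus (cs.take (j + 1)) = need := by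
  induction cs generalizing k d hits with
  | nil => simp [pvHitTimesGo]
  | cons c rest ih =>
    have hD : (if c = plus then (1 : Int) else 0) - (if c = minus then (1 : Int) else 0)
        = pvD plus minus c := rfl
    simp only [pvHitTimesGo, hD]
    rw [ih]
    have hmem : (m ∈ (if d + pvD plus minus c = need then PySem.Set.add hits (k + 1) else hits)) ↔
        (m ∈ hits ∨ (d + pvD plus minus c = need ∧ m = k + 1)) := by
      split_ifs with hd
      · rw [PySem.Set.mem_add]; tauto
      · tauto
    rw [hmem]
    constructor
    · rintro ((hm | ⟨hd, hm⟩) | ⟨j, hj, hm, hs⟩)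
      · exact Or.inl hm
      · refine Or.inr ⟨0, by simp, by omega, ?_⟩
        rw [pvDSum_take_one]; exact hd
      · refine Or.inr ⟨j + 1, by simpa using Nat.succ_lt_succ hj, by push_cast; omega, ?_⟩
        rw [pvDSum_take_succ]; omega
    · rintro (hm | ⟨j, hj, hm, hs⟩)
      · exact Or.inl (Or.inl hm)
      · match j with
        | 0 =>
          rw [pvDSum_take_one] at hs
          exact Or.inl (Or.inr ⟨hs, by omega⟩)
        | j' + 1 =>
          rw [pvDSum_take_succ] at hs
          refine Or.inr ⟨j', by simpa using Nat.lt_of_succ_lt_succ hj, by push_cast at hm ⊢; omega, by omega⟩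

theorem mem_pvHitTimes (cs : List Char) (plus minus : Char) (need : Int) (m : Int) :
    m ∈ pvHitTimes cs plus minus need ↔
      ∃ j : Nat, j < cs.length ∧ m = j + 1 ∧ pvDSum plus minus (cs.take (j + 1)) = need := by
  unfold pvHitTimes
  rw [mem_pvHitTimesGo]
  simp only [PySem.Set.empty, List.not_mem_nil, false_or]
  constructor <;> rintro ⟨j, hj, hm, hs⟩ <;> exact ⟨j, hj, by omega, by omega⟩

theorem pvNotDisjoint (s t : PySem.Set Int) :
    (!(PySem.Set.isdisjoint s t)) = decide (∃ m : Int, m ∈ s ∧ m ∈ t) := by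
  by_cases h : PySem.Set.isdisjoint s t = true
  · rw [h]
    have hd := (PySem.Set.isdisjoint_iff s t).mp h
    simp only [Bool.not_true]
    symm
    simp only [decide_eq_false_iff_not]
    rintro ⟨m, hm1, hm2⟩
    exact hd m hm1 hm2
  · rw [Bool.not_eq_true] at h
    rw [h]
    simp only [Bool.not_false]
    symm
    rw [decide_eq_true_iff]
    by_contra hno
    have hd : PySem.Set.isdisjoint s t = true :=
      (PySem.Set.isdisjoint_iff s t).mpr (fun x hx hx' => hno ⟨x, hx, hx'⟩)
    rw [h] at hd
    exact Bool.false_ne_true hd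

-- ===== VERDICT (by name: the statement is the Claim_ definition above) =====
theorem is_forbidden_sequence_spec : Claim_equal_is_forbidden_sequence := by
  intro sequence start_pos forbidden_pos _ _
  unfold Spec_is_forbidden_sequence is_forbidden_sequence is_forbidden_sequence_alt
  rw [pvNotDisjoint, Bool.eq_iff_iff, pvGoA_iff, decide_eq_true_iff]
  constructor
  · rintro ⟨j, hj, hr, hc⟩
    exact ⟨(j : Int) + 1,
      (mem_pvHitTimes _ _ _ _ _).2 ⟨j, hj, rfl, by omega⟩,
      (mem_pvHitTimes _ _ _ _ _).2 ⟨j, hj, rfl, by omega⟩⟩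
  · rintro ⟨m, hmr, hmc⟩
    obtain ⟨j, hj, hm, hr⟩ := (mem_pvHitTimes _ _ _ _ _).1 hmr
    obtain ⟨j', hj', hm', hc⟩ := (mem_pvHitTimes _ _ _ _ _).1 hmc
    have : j = j' := by omega
    subst this
    exact ⟨j, hj, by omega, by omega⟩
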